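-- pv_equiv track=rewrite | github.com/Alice-creator/HackerEarth | DataStructure/Hash/ValidPairs/ValidPairs.py | solve
-- ===== SOURCE A (Python) =====
-- def solve (N, wealth):
--     Arr = wealth
--     firstMax = 0
--     SecondMax = 0
--     temp = 3
--     setTemp = [temp]
--     dictTemp = dict()
--     result = 0
--
--     for i in range(len(Arr)):
--         if Arr[i] not in dictTemp:
--             dictTemp[Arr[i]] = 1
--         else:
--             dictTemp[Arr[i]] += 1
--         if Arr[i] > firstMax:
--             firstMax = Arr[i]
--             continue
--         if Arr[i] > SecondMax:
--             SecondMax = Arr[i]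
--
--     maximun = firstMax + SecondMax
--
--     while maximun > temp:
--         temp *= 3
--         setTemp.append(temp)
--
--     for i in Arr:
--         for j in setTemp:
--             if (j - i) in dictTemp:
--                 result += dictTemp[(j - i)]
--
--     return (int(result / 2))
-- ===== SOURCE B (Python) =====
-- def solve(N, wealth):
--     # Frequency table built once.
--     freq = {}
--     for x in wealth:
--         freq[x] = freq.get(x, 0) + 1
--     # Two-largest scan (same quirky semantics as the original: the old first
--     # maximum is never demoted to second place).
--     firstMax = 0
--     secondMax = 0
--     for x in wealth:
--         if x > firstMax:
--             firstMax = x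
--         elif x > secondMax:
--             secondMax = x
--     # Powers of 3: [3, 9, 27, ...] up to just above firstMax + secondMax.
--     powers = [3]
--     while firstMax + secondMax > powers[-1]:
--         powers.append(powers[-1] * 3)
--     # Count over DISTINCT values with multiplicities instead of per-element
--     # counterpart lookups.
--     total = 0
--     for p in powers:
--         for a in freq:
--             if p - a in freq:
--                 total += freq[a] * freq[p - a]
--     return int(total / 2)
-- ===== Notes on version B (the rewrite author's own statement) =====
-- stated objective: alternative
-- what changed: The counting pass iterates over powers and the distinct values of the frequency table, accumulating freq[a]*freq[p-a] products, instead of a per-element loop that looks up the counterpart count for every occurrence; the frequency table and the two-largest scan are built in separate single-purpose passes rather than one fused indexed loop.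
import Mathlib
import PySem

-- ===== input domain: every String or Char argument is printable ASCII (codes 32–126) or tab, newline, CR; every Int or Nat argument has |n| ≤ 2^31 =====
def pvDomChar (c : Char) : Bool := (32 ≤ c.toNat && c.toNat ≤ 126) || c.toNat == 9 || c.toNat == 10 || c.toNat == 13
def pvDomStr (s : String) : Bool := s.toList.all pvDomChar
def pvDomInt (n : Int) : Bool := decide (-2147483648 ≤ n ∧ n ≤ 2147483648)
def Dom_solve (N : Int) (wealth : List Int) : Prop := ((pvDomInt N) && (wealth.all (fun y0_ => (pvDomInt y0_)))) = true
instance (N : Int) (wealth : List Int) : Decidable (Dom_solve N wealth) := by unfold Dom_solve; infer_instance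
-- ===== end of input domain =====

-- B reshapes the counting pass: it accumulates freq[a]*freq[p-a] over powers and DISTINCT values
-- instead of per-element counterpart lookups (objective: alternative, same cost class).
-- Python's final 'int(result/2)' (float division) is ported as floor division: the accumulated
-- count is a non-negative even integer, where the two coincide.

-- ===== PORT A =====
-- while maximun > temp: temp *= 3; setTemp.append(temp)   (returns the appended tail)
def solveWhilePow (maximun temp : Int) (ht : 0 < temp) : List Int :=
  if h : maximun > temp then
    (temp * 3) :: solveWhilePow maximun (temp * 3) (by omega)
  else []
termination_by (maximun - temp).toNat
decreasing_by omega

def solve (N : Int) (wealth : List Int) : Int :=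
  -- first pass: build dictTemp and firstMax/SecondMax over range(len(Arr))
  let st : PySem.Dict Int Int × Int × Int :=
    (PySem.List.pyRange 0 (PySem.List.len wealth)).foldl
      (fun (s : PySem.Dict Int Int × Int × Int) i =>
        let x := PySem.List.pyGetD wealth i 0
        let d := if s.1.contains x = false then s.1.insert x 1
                 else s.1.insert x (s.1.getD x 0 + 1)
        if x > s.2.1 then (d, x, s.2.2)
        else if x > s.2.2 then (d, s.2.1, x)
        else (d, s.2.1, s.2.2))
      (PySem.Dict.empty, 0, 0)
  let dictTemp := st.1
  let maximun := st.2.1 + st.2.2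
  let setTemp : List Int := 3 :: solveWhilePow maximun 3 (by norm_num)
  let result : Int :=
    wealth.foldl
      (fun r i => setTemp.foldl
        (fun r j => if dictTemp.contains (j - i) then r + dictTemp.getD (j - i) 0 else r) r)
      0
  PySem.Int.floordiv result 2

-- ===== PORT B =====
-- powers = [3]; while fM + sM > powers[-1]: powers.append(powers[-1] * 3)
def altPowers (m last : Int) (hl : 0 < last) : List Int :=
  last :: (if h : m > last then altPowers m (last * 3) (by omega) else [])
termination_by (m - last).toNat
decreasing_by omega

def solve_alt (N : Int) (wealth : List Int) : Int :=
  let freq : PySem.Dict Int Int :=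
    wealth.foldl (fun d x => d.insert x (d.getD x 0 + 1)) PySem.Dict.empty
  let ms : Int × Int :=
    wealth.foldl (fun (p : Int × Int) x =>
      if x > p.1 then (x, p.2) else if x > p.2 then (p.1, x) else p) (0, 0)
  let powers : List Int := altPowers (ms.1 + ms.2) 3 (by norm_num)
  let total : Int :=
    powers.foldl
      (fun t p => freq.keys.foldl
        (fun t a => if freq.contains (p - a) then t + freq.getD a 0 * freq.getD (p - a) 0 else t) t)
      0
  PySem.Int.floordiv total 2

-- ===== PRECONDITION & SPEC =====
def Spec_solve (N : Int) (wealth : List Int) (out : Int) : Prop := out = solve_alt N wealth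
instance (N : Int) (wealth : List Int) (out : Int) : Decidable (Spec_solve N wealth out) := by unfold Spec_solve; infer_instance

-- ===== CLAIM (what is proved, stated in full; the proofs are below) =====
def Claim_equal_solve : Prop := ∀ (N : Int) (wealth : List Int), Dom_solve N wealth → Spec_solve N wealth (solve N wealth)

-- ===== LEMMAS AND PROOFS =====

-- A's dict-update branch equals B's unconditional get-based update.
theorem dict_step_eq (d : PySem.Dict Int Int) (x : Int) :
    (if d.contains x = false then d.insert x 1 else d.insert x (d.getD x 0 + 1))
      = d.insert x (d.getD x 0 + 1) := by
  by_cases h : d.contains x = false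
  · simp [h, PySem.Dict.getD_of_not_contains d 0 h]
  · simp [h]

-- A's fused first pass splits into B's two independent folds.
theorem first_pass_split (l : List Int) (d : PySem.Dict Int Int) (a b : Int) :
    l.foldl
      (fun (s : PySem.Dict Int Int × Int × Int) x =>
        let d' := if s.1.contains x = false then s.1.insert x 1
                  else s.1.insert x (s.1.getD x 0 + 1)
        if x > s.2.1 then (d', x, s.2.2)
        else if x > s.2.2 then (d', s.2.1, x)
        else (d', s.2.1, s.2.2)) (d, a, b)
    = (l.foldl (fun d x => d.insert x (d.getD x 0 + 1)) d,
       l.foldl (fun (p : Int × Int) x =>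
         if x > p.1 then (x, p.2) else if x > p.2 then (p.1, x) else p) (a, b)) := by
  induction l generalizing d a b with
  | nil => rfl
  | cons x l ih =>
    simp only [List.foldl_cons]
    rw [dict_step_eq]
    by_cases h1 : x > a <;> by_cases h2 : x > b <;>
      simp only [h1, h2, if_true, if_false] <;>
      exact ih _ _ _

-- The two power-list generators produce the same list.
theorem powers_eq (m t : Int) (ht : 0 < t) :
    altPowers m t ht = t :: solveWhilePow m t ht := by
  unfold altPowers solveWhilePow
  by_cases h : m > t
  · simp only [h, dif_pos]
    exact congrArg _ (powers_eq m (t * 3) (by omega))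
  · simp [h]
termination_by (m - t).toNat
decreasing_by omega

-- A fold adding a guarded term is the sum of the guarded terms.
theorem foldl_if_add {α : Type} (l : List α) (c : α → Bool) (g : α → Int) (r : Int) :
    l.foldl (fun r x => if c x then r + g x else r) r
      = r + (l.map (fun x => if c x then g x else 0)).sum := by
  have : (fun (r : Int) (x : α) => if c x then r + g x else r)
      = fun r x => r + (if c x then g x else 0) := by
    funext r x; by_cases h : c x <;> simp [h]
  rw [this, PySem.List.foldl_add]

-- Double sums over two lists commute.
theorem sum_swap {α β : Type} (l : List α) (m : List β) (f : α → β → Int) :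
    (l.map (fun x => (m.map (f x)).sum)).sum
      = (m.map (fun y => (l.map (fun x => f x y)).sum)).sum := by
  induction l with
  | nil => simp
  | cons x l ih =>
    simp only [List.map_cons, List.sum_cons, ih]
    rw [← PySem.List.sum_map_add_int]

-- Summing a value-dependent function over the list = multiplicity-weighted sum over distinct values.
theorem sum_over_counts (l : List Int) (g : Int → Int) :
    (l.map g).sum
      = ((PySem.Set.ofList l).map (fun a => (l.count a : Int) * g a)).sum := by
  rw [← List.sum_toFinset _ (PySem.Set.nodup_ofList l)]
  have : (PySem.Set.ofList l).toFinset = l.toFinset := by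
    ext a; simp [PySem.Set.mem_ofList]
  rw [this, Finset.sum_list_map_count l g]
  apply Finset.sum_congr rfl
  intro a _
  simp

-- The counting pass over elements equals the counting pass over distinct keys
-- with multiplicities, for any powers list P.
theorem count_pass_eq (wealth P : List Int) (d : PySem.Dict Int Int)
    (hcount : ∀ a : Int, d.getD a 0 = (wealth.count a : Int))
    (hkeys : d.keys = PySem.Set.ofList wealth) :
    wealth.foldl
      (fun r i => P.foldl
        (fun r j => if d.contains (j - i) then r + d.getD (j - i) 0 else r) r) 0
    = P.foldl
      (fun t p => d.keys.foldl
        (fun t a => if d.contains (p - a) then t + d.getD a 0 * d.getD (p - a) 0 else t) t) 0 := by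
  have hA : wealth.foldl
      (fun r i => P.foldl
        (fun r j => if d.contains (j - i) then r + d.getD (j - i) 0 else r) r) 0
      = (wealth.map (fun i => (P.map (fun j =>
          if d.contains (j - i) then d.getD (j - i) 0 else 0)).sum)).sum := by
    have : (fun (r : Int) (i : Int) => P.foldl
        (fun r j => if d.contains (j - i) then r + d.getD (j - i) 0 else r) r)
        = fun r i => r + (P.map (fun j =>
            if d.contains (j - i) then d.getD (j - i) 0 else 0)).sum := by
      funext r i; rw [foldl_if_add]
    rw [this, PySem.List.foldl_add]; simp
  have hB : P.foldl
      (fun t p => d.keys.foldl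
        (fun t a => if d.contains (p - a) then t + d.getD a 0 * d.getD (p - a) 0 else t) t) 0
      = (P.map (fun p => (d.keys.map (fun a =>
          if d.contains (p - a) then d.getD a 0 * d.getD (p - a) 0 else 0)).sum)).sum := by
    have : (fun (t : Int) (p : Int) => d.keys.foldl
        (fun t a => if d.contains (p - a) then t + d.getD a 0 * d.getD (p - a) 0 else t) t)
        = fun t p => t + (d.keys.map (fun a =>
            if d.contains (p - a) then d.getD a 0 * d.getD (p - a) 0 else 0)).sum := by
      funext t p; rw [foldl_if_add]
    rw [this, PySem.List.foldl_add]; simp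
  rw [hA, hB]
  calc (wealth.map (fun i => (P.map (fun j =>
          if d.contains (j - i) then d.getD (j - i) 0 else 0)).sum)).sum
      = ((PySem.Set.ofList wealth).map (fun a => (wealth.count a : Int) *
          (P.map (fun j => if d.contains (j - a) then d.getD (j - a) 0 else 0)).sum)).sum := by
        rw [sum_over_counts]
    _ = ((PySem.Set.ofList wealth).map (fun a => (P.map (fun j =>
          if d.contains (j - a) then (wealth.count a : Int) * d.getD (j - a) 0 else 0)).sum)).sum := by
        apply congrArg; apply List.map_congr_left; intro a _
        rw [← List.sum_map_mul_left]; apply congrArg; apply List.map_congr_left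
        intro j _; by_cases h : d.contains (j - a) <;> simp [h]
    _ = (P.map (fun p => ((PySem.Set.ofList wealth).map (fun a =>
          if d.contains (p - a) then (wealth.count a : Int) * d.getD (p - a) 0 else 0)).sum)).sum := by
        rw [sum_swap]
    _ = (P.map (fun p => (d.keys.map (fun a =>
          if d.contains (p - a) then d.getD a 0 * d.getD (p - a) 0 else 0)).sum)).sum := by
        apply congrArg; apply List.map_congr_left; intro p _
        rw [hkeys]; apply congrArg; apply List.map_congr_left; intro a _
        rw [hcount a]

theorem solve_eq_alt (N : Int) (wealth : List Int) : solve N wealth = solve_alt N wealth := by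
  unfold solve solve_alt
  dsimp only
  rw [PySem.List.foldl_pyRange_zero_pyGetD wealth 0
        (fun (s : PySem.Dict Int Int × Int × Int) x =>
          let d := if s.1.contains x = false then s.1.insert x 1
                   else s.1.insert x (s.1.getD x 0 + 1)
          if x > s.2.1 then (d, x, s.2.2)
          else if x > s.2.2 then (d, s.2.1, x)
          else (d, s.2.1, s.2.2))
        (PySem.Dict.empty, 0, 0)]
  rw [first_pass_split]
  rw [powers_eq]
  set d : PySem.Dict Int Int :=
    wealth.foldl (fun d x => d.insert x (d.getD x 0 + 1)) PySem.Dict.empty with hd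
  congr 1
  have hcount : ∀ a : Int, d.getD a 0 = (wealth.count a : Int) := fun a => by
    rw [hd, PySem.Dict.getD_foldl_insert_add_one]; simp
  have hkeys : d.keys = PySem.Set.ofList wealth := by
    rw [hd, PySem.Dict.keys_foldl_insert]
    simp only [PySem.Dict.keys_empty]
    exact PySem.Set.update_empty wealth
  exact count_pass_eq wealth _ d hcount hkeys

-- ===== VERDICT (by name: the statement is the Claim_ definition above) =====
theorem solve_spec : Claim_equal_solve := by
  intro N wealth _
  unfold Spec_solve
  exact solve_eq_alt N wealth
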